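-- pv_equiv track=rewrite | github.com/FFFzy/codeDraft | inCSU/PycharmProjects/data1/data7.py | relationships
-- ===== SOURCE A (Python) =====
-- def relationships(linesName,relationship,name_list):
--     for line in linesName:
--         for name1 in line:
--             if name1 in name_list:
--                 for name2 in line:
--                     if name1==name2:
--                         continue
--                     if relationship[name1].get(name2) is None:
--                         relationship[name1][name2]=1
--                     else:
--                         relationship[name1][name2]+=1
--     return relationship
-- ===== SOURCE B (Python) =====
-- def relationships(linesName, relationship, name_list):
--     # Per line: build a frequency table once, skip lines without two distinct
--     # names, then for each listed name a fetch its row ONCE and add ca*cb for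
--     # every other distinct name b, instead of A's position-by-position rescans.
--     for line in linesName:
--         counts = {}
--         for n in line:
--             counts[n] = counts.get(n, 0) + 1
--         if len(counts) < 2:
--             continue
--         for a, ca in counts.items():
--             if a in name_list:
--                 inner = relationship[a]
--                 for b, cb in counts.items():
--                     if b != a:
--                         inner[b] = inner.get(b, 0) + ca * cb
--     return relationship
-- ===== Notes on version B (the rewrite author's own statement) =====
-- stated objective: faster
-- what changed: B builds one per-line frequency table, skips lines with fewer than two distinct names, and for each listed name fetches its row once and adds count(a)*count(b) per distinct other name, replacing A's nested position-by-position rescans and per-pair row lookups.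
import Mathlib
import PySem

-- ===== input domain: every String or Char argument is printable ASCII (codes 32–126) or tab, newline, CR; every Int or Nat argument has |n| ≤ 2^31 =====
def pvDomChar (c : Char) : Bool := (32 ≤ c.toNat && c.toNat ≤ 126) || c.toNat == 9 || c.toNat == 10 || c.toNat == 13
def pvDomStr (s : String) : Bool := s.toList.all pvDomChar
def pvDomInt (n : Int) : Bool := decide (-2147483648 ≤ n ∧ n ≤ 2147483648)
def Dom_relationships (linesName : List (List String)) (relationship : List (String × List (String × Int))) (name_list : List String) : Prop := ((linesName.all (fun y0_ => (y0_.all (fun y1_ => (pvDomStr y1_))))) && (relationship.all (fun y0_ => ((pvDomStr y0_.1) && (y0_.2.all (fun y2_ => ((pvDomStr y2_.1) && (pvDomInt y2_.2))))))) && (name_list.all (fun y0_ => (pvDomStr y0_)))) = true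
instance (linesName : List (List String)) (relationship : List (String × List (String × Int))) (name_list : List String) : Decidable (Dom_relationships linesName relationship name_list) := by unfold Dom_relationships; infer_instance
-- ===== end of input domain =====

-- B builds one frequency table per line, skips lines with fewer than two distinct
-- names, fetches each listed name's row once and adds count(a)*count(b) per distinct
-- other name, replacing A's position-by-position nested rescans; both Pythons mutate
-- `relationship` in place and return it, and the ports model that returned value.

-- ===== PORT A =====
-- one `relationship[name1][name2]` update of A; `none` on the outer lookup is where
-- Python raises KeyError (excluded by Pre_relationships)
def relInc (rel : PySem.Dict String (List (String × Int))) (n1 n2 : String) :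
    PySem.Dict String (List (String × Int)) :=
  match rel.get? n1 with
  | none => rel
  | some d =>
    match (PySem.Dict.mk d).get? n2 with
    | none => rel.insert n1 ((PySem.Dict.mk d).insert n2 1).items
    | some v => rel.insert n1 ((PySem.Dict.mk d).insert n2 (v + 1)).items

def relationships (linesName : List (List String)) (relationship : List (String × List (String × Int))) (name_list : List String) : List (String × List (String × Int)) :=
  (linesName.foldl (fun rel line =>
      line.foldl (fun rel n1 =>
        if name_list.contains n1 then
          line.foldl (fun rel n2 =>
            if n1 == n2 then rel else relInc rel n1 n2) rel
        else rel) rel)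
    (PySem.Dict.mk relationship)).items

-- ===== PORT B =====
-- transliteration of Source B; `inner = relationship[a]` with `a` absent is where Python
-- raises KeyError (excluded by Pre_relationships); the fetched row is mutated through
-- the alias, modelled by folding on it and re-inserting the result
def relationships_alt (linesName : List (List String)) (relationship : List (String × List (String × Int))) (name_list : List String) : List (String × List (String × Int)) :=
  (linesName.foldl (fun rel line =>
      let counts := line.foldl (fun c n => c.insert n (c.getD n 0 + 1))
        (PySem.Dict.empty : PySem.Dict String Int)
      if counts.items.length < 2 then rel
      else counts.items.foldl (fun rel pa =>
        if name_list.contains pa.1 then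
          match rel.get? pa.1 with
          | none => rel
          | some inner =>
            rel.insert pa.1
              ((counts.items.foldl
                  (fun d pb => if pb.1 == pa.1 then d
                    else d.insert pb.1 (d.getD pb.1 0 + pa.2 * pb.2))
                  (PySem.Dict.mk inner)).items)
        else rel) rel)
    (PySem.Dict.mk relationship)).items

-- ===== PRECONDITION & SPEC =====
-- Pre_ excludes (i) inputs on which Python A raises KeyError (a name that occurs in a
-- line together with a different name, is listed in name_list, but is missing from
-- relationship), and (ii) association lists with duplicate top-level or inner keys,
-- which represent no Python input at all (a Python dict cannot have duplicate keys).
def Pre_relationships (linesName : List (List String)) (relationship : List (String × List (String × Int))) (name_list : List String) : Prop :=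
  (relationship.map Prod.fst).Nodup ∧
  (∀ p ∈ relationship, (p.2.map Prod.fst).Nodup) ∧
  (∀ line ∈ linesName, ∀ n1 ∈ line, n1 ∈ name_list → (∃ n2 ∈ line, n2 ≠ n1) →
    n1 ∈ relationship.map Prod.fst)
instance (linesName : List (List String)) (relationship : List (String × List (String × Int))) (name_list : List String) : Decidable (Pre_relationships linesName relationship name_list) := by unfold Pre_relationships; infer_instance

def pvWitness_relationships : List (List String) × (List (String × List (String × Int))) × List String :=
  ([["ann", "bob", "ann"], ["bob", "cat"]],
   [("ann", [("cat", 2)]), ("bob", [])],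
   ["ann", "bob"])

def Spec_relationships (linesName : List (List String)) (relationship : List (String × List (String × Int))) (name_list : List String) (out : List (String × List (String × Int))) : Prop := out = relationships_alt linesName relationship name_list
instance (linesName : List (List String)) (relationship : List (String × List (String × Int))) (name_list : List String) (out : List (String × List (String × Int))) : Decidable (Spec_relationships linesName relationship name_list out) := by unfold Spec_relationships; infer_instance

-- ===== CLAIM (what is proved, stated in full; the proofs are below) =====
def Claim_equal_relationships : Prop := ∀ (linesName : List (List String)) (relationship : List (String × List (String × Int))) (name_list : List String), Dom_relationships linesName relationship name_list → Pre_relationships linesName relationship name_list → Spec_relationships linesName relationship name_list (relationships linesName relationship name_list)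

-- ===== LEMMAS AND PROOFS =====

-- inner-dict bump: d[b] = d.get(b, 0) + w
def ibump (D : PySem.Dict String Int) (b : String) (w : Int) : PySem.Dict String Int :=
  D.insert b (D.getD b 0 + w)

-- A's inner pass (one occurrence of name1): +1 for every occurrence of b in l
def pass1 (l : List String) (D : PySem.Dict String Int) : PySem.Dict String Int :=
  l.foldl (fun D b => ibump D b 1) D

-- B's weighted pass over distinct names
def wpass (l : List String) (w : String → Int) (D : PySem.Dict String Int) : PySem.Dict String Int :=
  l.foldl (fun D b => ibump D b (w b)) D

-- read-modify-write of one top-level key (skip when absent)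
def rmw (f : List (String × Int) → List (String × Int)) (a : String)
    (rel : PySem.Dict String (List (String × Int))) : PySem.Dict String (List (String × Int)) :=
  match rel.get? a with
  | none => rel
  | some d => rel.insert a (f d)


-- ---- generic dict lemmas ----

theorem dict_insert_comm {κ ν : Type} [BEq κ] [LawfulBEq κ] (D : PySem.Dict κ ν) {b c : κ}
    (x y : ν) (hb : D.contains b = true) (hbc : b ≠ c) :
    (D.insert c x).insert b y = (D.insert b y).insert c x := by
  have hbc' : (b == c) = false := by simp [hbc]
  have hcb' : (c == b) = false := by simp [Ne.symm hbc]
  cases hc : D.contains c with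
  | true =>
    apply PySem.Dict.ext
    rw [PySem.Dict.items_insert_of_contains _ y (by simp [PySem.Dict.contains_insert, hb]),
        PySem.Dict.items_insert_of_contains _ x hc,
        PySem.Dict.items_insert_of_contains _ x (by simp [PySem.Dict.contains_insert, hc]),
        PySem.Dict.items_insert_of_contains _ y hb,
        List.map_map, List.map_map]
    apply List.map_congr_left
    intro p _
    by_cases hpb : (p.1 == b) = true
    · have : (p.1 == c) = false := by
        have := eq_of_beq hpb; subst this; exact hbc'
      simp [Function.comp, this, hpb]
      exact fun h => absurd h hbc
    · by_cases hpc : (p.1 == c) = true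
      · simp [Function.comp, hpb, hpc]
        exact fun h => absurd (Eq.symm h) hbc
      · simp [Function.comp, hpb, hpc]
  | false =>
    apply PySem.Dict.ext
    rw [PySem.Dict.items_insert_of_contains _ y (by simp [PySem.Dict.contains_insert, hb]),
        PySem.Dict.items_insert_of_not_contains _ x hc,
        PySem.Dict.items_insert_of_not_contains _ x
          (by simp [PySem.Dict.contains_insert, hc, hcb']),
        PySem.Dict.items_insert_of_contains _ y hb,
        List.map_append]
    simp [hcb']

theorem insert_self_of_get? {κ ν : Type} [BEq κ] [LawfulBEq κ] (D : PySem.Dict κ ν) {b : κ} {v : ν}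
    (hn : D.keys.Nodup) (h : D.get? b = some v) : D.insert b v = D := by
  have hc : D.contains b = true := by
    rw [PySem.Dict.contains_eq_isSome_get?, h]; rfl
  apply PySem.Dict.ext
  rw [PySem.Dict.items_insert_of_contains _ v hc]
  conv_rhs => rw [← List.map_id D.items]
  apply List.map_congr_left
  intro p hp
  by_cases hpb : (p.1 == b) = true
  · have hpb' := eq_of_beq hpb
    have hmem : (b, p.2) ∈ D.items := by rw [← hpb']; exact hp
    have := PySem.Dict.get?_of_mem_items D hmem hn
    rw [h] at this
    have hv : p.2 = v := by injection this.symm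
    simp [← hpb', ← hv]
  · simp [hpb]

-- ---- inner bump lemmas ----

theorem ibump_contains (D : PySem.Dict String Int) (b c : String) (w : Int) :
    (ibump D b w).contains c = (c == b || D.contains c) := by
  simp [ibump, PySem.Dict.contains_insert]

theorem ibump_contains_self (D : PySem.Dict String Int) (b : String) (w : Int) :
    (ibump D b w).contains b = true := by
  simp [ibump, PySem.Dict.contains_insert_self]

theorem ibump_nodup (D : PySem.Dict String Int) (b : String) (w : Int)
    (h : D.keys.Nodup) : (ibump D b w).keys.Nodup := by
  exact PySem.Dict.nodup_keys_insert _ _ _ h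

theorem ibump_ibump_self (D : PySem.Dict String Int) (b : String) (w w' : Int) :
    ibump (ibump D b w) b w' = ibump D b (w + w') := by
  simp [ibump, PySem.Dict.getD_insert_self, PySem.Dict.insert_insert_self, add_assoc]

theorem ibump_comm (D : PySem.Dict String Int) {b c : String} (u v : Int)
    (hbc : b ≠ c) (hb : D.contains b = true) :
    ibump (ibump D c u) b v = ibump (ibump D b v) c u := by
  unfold ibump
  rw [PySem.Dict.getD_insert_of_ne _ _ _ hbc, PySem.Dict.getD_insert_of_ne _ _ _ (Ne.symm hbc)]
  exact dict_insert_comm D _ _ hb hbc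

theorem ibump_zero (D : PySem.Dict String Int) {b : String}
    (hb : D.contains b = true) (hn : D.keys.Nodup) : ibump D b 0 = D := by
  have h : ∃ v, D.get? b = some v := by
    rw [PySem.Dict.contains_eq_isSome_get?] at hb
    exact Option.isSome_iff_exists.mp hb
  obtain ⟨v, hv⟩ := h
  unfold ibump
  rw [PySem.Dict.getD_eq_get?_getD, hv]
  simpa using insert_self_of_get? D hn hv


-- ---- fold plumbing ----

theorem foldl_skip {α β : Type} (p : α → Bool) (f : β → α → β) :
    ∀ (l : List α) (init : β),
      l.foldl (fun s x => if p x then s else f s x) init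
        = (l.filter (fun x => !p x)).foldl f init := by
  intro l
  induction l with
  | nil => intro init; rfl
  | cons x r ih =>
    intro init
    cases hx : p x with
    | false =>
      have h2 : (if p x = true then init else f init x) = f init x := by simp [hx]
      rw [List.foldl_cons, h2, List.filter_cons_of_pos (by simp [hx]), List.foldl_cons, ih]
    | true =>
      have h2 : (if p x = true then init else f init x) = init := by simp [hx]
      rw [List.foldl_cons, h2, List.filter_cons_of_neg (by simp [hx]), ih]

theorem foldl_congr_inv {α β : Type} (I : β → Prop) (f g : β → α → β) :
    ∀ (l : List α) (init : β), (∀ b a, I b → a ∈ l → f b a = g b a) →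
      (∀ b a, I b → a ∈ l → I (g b a)) → I init →
      l.foldl f init = l.foldl g init := by
  intro l
  induction l with
  | nil => intro init _ _ _; rfl
  | cons x r ih =>
    intro init hfg hg hI
    simp only [List.foldl_cons]
    rw [hfg init x hI (by simp)]
    exact ih (g init x) (fun b a hb ha => hfg b a hb (by simp [ha]))
      (fun b a hb ha => hg b a hb (by simp [ha])) (hg init x hI (by simp))

theorem foldl_inv {α β : Type} (I : β → Prop) (g : β → α → β) :
    ∀ (l : List α) (init : β), (∀ b a, I b → a ∈ l → I (g b a)) → I init →
      I (l.foldl g init) := by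
  intro l
  induction l with
  | nil => intro init _ h; exact h
  | cons x r ih =>
    intro init hg hI
    exact ih (g init x) (fun b a hb ha => hg b a hb (by simp [ha])) (hg init x hI (by simp))

-- ---- Set.ofList plumbing ----

theorem ofList_cons (b : String) (r : List String) :
    PySem.Set.ofList (b :: r) = b :: (PySem.Set.ofList r).filter (fun x => !(x == b)) := by
  have h1 : b :: r = [b] ++ r := rfl
  rw [h1, PySem.Set.ofList_append]
  have h2 : PySem.Set.ofList [b] = [b] := rfl
  rw [h2, PySem.Set.update_eq_append_filter]
  simp only [List.singleton_append, List.cons.injEq, true_and]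
  apply List.filter_congr
  intro y _
  by_cases h : y = b <;> simp [h]

theorem ofList_filter_comm (q : String → Bool) :
    ∀ (r : List String),
      (PySem.Set.ofList r).filter q = PySem.Set.ofList (r.filter q) := by
  intro r
  induction r with
  | nil => rfl
  | cons x r ih =>
    rw [ofList_cons]
    cases hx : q x with
    | true =>
      rw [List.filter_cons_of_pos hx, List.filter_cons_of_pos hx, ofList_cons,
          List.filter_comm, ih]
    | false =>
      rw [List.filter_cons_of_neg (by simp [hx]), List.filter_cons_of_neg (by simp [hx])]
      rw [List.filter_comm, ih]
      apply List.filter_eq_self.mpr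
      intro y hy
      have hy' : y ∈ r.filter q := (PySem.Set.mem_ofList _ _).mp hy
      by_cases hyb : y = x
      · subst hyb
        have : q y = true := List.of_mem_filter hy'
        rw [hx] at this; cases this
      · simp [hyb]

-- ---- pass-level lemmas ----

theorem wpass_cons (b : String) (l : List String) (w : String → Int) (D : PySem.Dict String Int) :
    wpass (b :: l) w D = wpass l w (ibump D b (w b)) := rfl

theorem wpass_nodup (l : List String) (w : String → Int) :
    ∀ (D : PySem.Dict String Int), D.keys.Nodup → (wpass l w D).keys.Nodup := by
  induction l with
  | nil => intro D h; exact h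
  | cons c r ih =>
    intro D h
    rw [wpass_cons]
    exact ih _ (ibump_nodup _ _ _ h)

theorem ibump_wpass_comm (b : String) (v : Int) (w : String → Int) :
    ∀ (l : List String) (D : PySem.Dict String Int), b ∉ l → D.contains b = true →
      ibump (wpass l w D) b v = wpass l w (ibump D b v) := by
  intro l
  induction l with
  | nil => intro D _ _; rfl
  | cons c r ih =>
    intro D hnot hb
    have hbc : b ≠ c := fun h => hnot (by simp [h])
    rw [wpass_cons, wpass_cons,
        ih _ (fun h => hnot (by simp [h])) (by rw [ibump_contains]; simp [hb]),
        ibump_comm D (w c) v hbc hb]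

theorem pass1_pull (b : String) :
    ∀ (l : List String) (X : PySem.Dict String Int), X.contains b = true → X.keys.Nodup →
      pass1 l X = pass1 (l.filter (fun x => !(x == b))) (ibump X b (l.count b)) := by
  intro l
  induction l with
  | nil =>
    intro X hb hn
    simp only [List.filter_nil, List.count_nil]
    rw [pass1]
    simp only [List.foldl_nil]
    exact (ibump_zero X hb hn).symm
  | cons c r ih =>
    intro X hb hn
    by_cases hcb : c = b
    · subst hcb
      have h1 : pass1 (c :: r) X = pass1 r (ibump X c 1) := rfl
      rw [h1, ih _ (ibump_contains_self _ _ _) (ibump_nodup _ _ _ hn),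
          ibump_ibump_self]
      rw [List.filter_cons_of_neg (by simp), List.count_cons_self]
      congr 1
      push_cast
      ring
    · have h1 : pass1 (c :: r) X = pass1 r (ibump X c 1) := rfl
      rw [h1, ih _ (by rw [ibump_contains]; simp [hb]) (ibump_nodup _ _ _ hn)]
      rw [ibump_comm X 1 ((r.count b : Int)) (fun h => hcb h.symm) hb]
      rw [List.filter_cons_of_pos (by simp [hcb]),
          List.count_cons_of_ne hcb]
      rfl

theorem pass1_eq_counts :
    ∀ (l : List String) (D : PySem.Dict String Int), D.keys.Nodup →
      pass1 l D = wpass (PySem.Set.ofList l) (fun b => (l.count b : Int)) D := by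
  intro l
  induction hl : l.length using Nat.strong_induction_on generalizing l with
  | _ n ih =>
  match l with
  | [] => intro D _; rfl
  | b :: r =>
    intro D hn
    have h1 : pass1 (b :: r) D = pass1 r (ibump D b 1) := rfl
    rw [h1, pass1_pull b r _ (ibump_contains_self _ _ _) (ibump_nodup _ _ _ hn),
        ibump_ibump_self]
    rw [ofList_cons, wpass_cons, List.count_cons_self, ofList_filter_comm]
    have hlen : (r.filter (fun x => !(x == b))).length < n := by
      subst hl
      have := List.length_filter_le (fun x => !(x == b)) r
      simp only [List.length_cons]
      omega
    rw [ih _ hlen _ rfl _ (ibump_nodup _ _ _ hn)]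
    have harg : (1 + (r.count b : Int)) = ((r.count b + 1 : Nat) : Int) := by push_cast; ring
    rw [harg]
    simp only [wpass]
    apply PySem.List.foldl_congr_mem
    intro acc x hx
    have hxb : x ≠ b := by
      have hx' : x ∈ r.filter (fun y => !(y == b)) := (PySem.Set.mem_ofList _ _).mp hx
      have := List.of_mem_filter hx'
      simpa using this
    congr 1
    rw [List.count_filter (by simp [hxb]), List.count_cons_of_ne (Ne.symm hxb)]

theorem wpass_add (w1 w2 : String → Int) :
    ∀ (S : List String), S.Nodup → ∀ (D : PySem.Dict String Int),
      wpass S w1 (wpass S w2 D) = wpass S (fun b => w2 b + w1 b) D := by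
  intro S
  induction S with
  | nil => intro _ D; rfl
  | cons b R ih =>
    intro hnd D
    have hbR : b ∉ R := by simp [List.nodup_cons] at hnd; exact hnd.1
    have hR : R.Nodup := by simp [List.nodup_cons] at hnd; exact hnd.2
    rw [wpass_cons, wpass_cons, wpass_cons,
        ibump_wpass_comm b (w1 b) w2 R _ hbR (ibump_contains_self _ _ _),
        ibump_ibump_self, ih hR]

theorem pass1_iter (l : List String) :
    ∀ (k : Nat) (D : PySem.Dict String Int), D.keys.Nodup →
      (pass1 l)^[k + 1] D
        = wpass (PySem.Set.ofList l) (fun b => ((k : Int) + 1) * (l.count b : Int)) D := by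
  intro k
  induction k with
  | zero =>
    intro D hn
    rw [Function.iterate_one, pass1_eq_counts l D hn]
    simp only [wpass]
    apply PySem.List.foldl_congr_mem
    intro acc x _
    norm_num
  | succ k ih =>
    intro D hn
    rw [Function.iterate_succ_apply', ih D hn,
        pass1_eq_counts _ _ (wpass_nodup _ _ _ hn),
        wpass_add _ _ _ (PySem.Set.nodup_ofList l) D]
    simp only [wpass]
    apply PySem.List.foldl_congr_mem
    intro acc x hx
    congr 1
    push_cast
    ring

-- ---- outer (top-level dict) lemmas ----

def gstep (P : String → Bool) (F : String → List (String × Int) → List (String × Int))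
    (a : String) (rel : PySem.Dict String (List (String × Int))) :
    PySem.Dict String (List (String × Int)) :=
  if P a then rmw (F a) a rel else rel

theorem rmw_keys (f : List (String × Int) → List (String × Int)) (a : String)
    (rel : PySem.Dict String (List (String × Int))) : (rmw f a rel).keys = rel.keys := by
  unfold rmw
  cases h : rel.get? a with
  | none => rfl
  | some d =>
    have hc : rel.contains a = true := by rw [PySem.Dict.contains_eq_isSome_get?, h]; rfl
    exact PySem.Dict.keys_insert_of_contains _ _ hc

theorem gstep_keys (P : String → Bool) (F : String → List (String × Int) → List (String × Int))
    (a : String) (rel : PySem.Dict String (List (String × Int))) :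
    (gstep P F a rel).keys = rel.keys := by
  unfold gstep
  cases hP : P a
  · rfl
  · simp only [if_pos rfl]; exact rmw_keys _ _ _

theorem rmw_rmw_self (f g : List (String × Int) → List (String × Int)) (a : String)
    (rel : PySem.Dict String (List (String × Int))) :
    rmw f a (rmw g a rel) = rmw (fun d => f (g d)) a rel := by
  unfold rmw
  cases h : rel.get? a with
  | none => simp [h]
  | some d => simp [h, PySem.Dict.get?_insert_self, PySem.Dict.insert_insert_self]

theorem rmw_comm (f g : List (String × Int) → List (String × Int)) {a c : String}
    (hac : a ≠ c) (rel : PySem.Dict String (List (String × Int))) :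
    rmw f a (rmw g c rel) = rmw g c (rmw f a rel) := by
  unfold rmw
  cases hc : rel.get? c with
  | none =>
    cases ha : rel.get? a with
    | none => simp [ha, hc]
    | some d => simp [ha, hc, PySem.Dict.get?_insert_of_ne _ _ (Ne.symm hac)]
  | some d' =>
    cases ha : rel.get? a with
    | none => simp [ha, hc, PySem.Dict.get?_insert_of_ne _ _ hac]
    | some d =>
      simp only [ha, hc, PySem.Dict.get?_insert_of_ne _ _ hac,
        PySem.Dict.get?_insert_of_ne _ _ (Ne.symm hac)]
      have hca : rel.contains a = true := by rw [PySem.Dict.contains_eq_isSome_get?, ha]; rfl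
      exact dict_insert_comm rel (g d') (f d) hca hac

theorem gstep_comm (P : String → Bool) (F : String → List (String × Int) → List (String × Int))
    {a c : String} (hac : a ≠ c) (rel : PySem.Dict String (List (String × Int))) :
    gstep P F a (gstep P F c rel) = gstep P F c (gstep P F a rel) := by
  unfold gstep
  cases hPa : P a <;> cases hPc : P c <;> simp
  exact rmw_comm _ _ hac rel

theorem gstep_iter_comm (P : String → Bool)
    (F : String → List (String × Int) → List (String × Int)) {b c : String} (hcb : c ≠ b) :
    ∀ (k : Nat) (rel : PySem.Dict String (List (String × Int))),
      gstep P F c ((gstep P F b)^[k] rel) = (gstep P F b)^[k] (gstep P F c rel) := by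
  intro k
  induction k with
  | zero => intro rel; rfl
  | succ k ih =>
    intro rel
    rw [Function.iterate_succ_apply', Function.iterate_succ_apply',
        gstep_comm P F hcb, ih]

theorem gfold_pull (P : String → Bool)
    (F : String → List (String × Int) → List (String × Int)) (b : String) :
    ∀ (l : List String) (k : Nat) (rel : PySem.Dict String (List (String × Int))),
      l.foldl (fun r a => gstep P F a r) ((gstep P F b)^[k] rel)
        = (l.filter (fun x => !(x == b))).foldl (fun r a => gstep P F a r)
            ((gstep P F b)^[k + l.count b] rel) := by
  intro l
  induction l with
  | nil => intro k rel; rfl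
  | cons c r ih =>
    intro k rel
    by_cases hcb : c = b
    · subst hcb
      rw [List.foldl_cons, List.filter_cons_of_neg (by simp), List.count_cons_self]
      have h1 : gstep P F c ((gstep P F c)^[k] rel) = (gstep P F c)^[k + 1] rel := by
        rw [Function.iterate_succ_apply']
      rw [h1, ih (k + 1) rel]
      congr 2
      omega
    · rw [List.foldl_cons, gstep_iter_comm P F hcb k rel, ih k (gstep P F c rel),
          List.filter_cons_of_pos (by simp [hcb]), List.count_cons_of_ne hcb,
          List.foldl_cons, gstep_iter_comm P F hcb _ rel]

theorem gfold_group (P : String → Bool)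
    (F : String → List (String × Int) → List (String × Int)) :
    ∀ (l : List String) (rel : PySem.Dict String (List (String × Int))),
      l.foldl (fun r a => gstep P F a r) rel
        = (PySem.Set.ofList l).foldl (fun r a => (gstep P F a)^[l.count a] r) rel := by
  intro l
  induction hl : l.length using Nat.strong_induction_on generalizing l with
  | _ n ih =>
  match l with
  | [] => intro rel; rfl
  | b :: r =>
    intro rel
    have h1 : (b :: r).foldl (fun r a => gstep P F a r) rel
        = r.foldl (fun r a => gstep P F a r) ((gstep P F b)^[1] rel) := by
      rw [Function.iterate_one]; rfl
    rw [h1, gfold_pull P F b r 1 rel]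
    have hlen : (r.filter (fun x => !(x == b))).length < n := by
      subst hl
      have := List.length_filter_le (fun x => !(x == b)) r
      simp only [List.length_cons]
      omega
    rw [ih _ hlen _ rfl]
    rw [ofList_cons, ofList_filter_comm, List.foldl_cons, List.count_cons_self]
    have h2 : (1 + r.count b) = (r.count b + 1) := by omega
    rw [h2]
    apply PySem.List.foldl_congr_mem
    intro acc x hx
    have hxb : x ≠ b := by
      have hx' : x ∈ r.filter (fun y => !(y == b)) := (PySem.Set.mem_ofList _ _).mp hx
      have := List.of_mem_filter hx'
      simpa using this
    congr 1
    rw [List.count_filter (by simp [hxb]), List.count_cons_of_ne (Ne.symm hxb)]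

theorem gstep_iter (P : String → Bool)
    (F : String → List (String × Int) → List (String × Int)) (a : String) :
    ∀ (k : Nat) (rel : PySem.Dict String (List (String × Int))),
      (gstep P F a)^[k + 1] rel
        = if P a then rmw (fun d => (F a)^[k + 1] d) a rel else rel := by
  intro k
  induction k with
  | zero =>
    intro rel
    rw [Function.iterate_one]
    unfold gstep
    cases hP : P a <;> simp
  | succ k ih =>
    intro rel
    rw [Function.iterate_succ_apply', ih rel]
    cases hP : P a with
    | false => simp [hP, gstep]
    | true =>
      simp only [gstep, hP, if_true]
      rw [rmw_rmw_self]
      congr 1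
      funext d
      rw [← Function.iterate_succ_apply' (F a)]


-- ---- extraction of the ports' inner loops into rmw form ----

theorem mk_items (d : PySem.Dict String Int) : PySem.Dict.mk d.items = d := rfl

theorem rmw_congr (f g : List (String × Int) → List (String × Int)) (a : String)
    (rel : PySem.Dict String (List (String × Int)))
    (h : ∀ d, rel.get? a = some d → f d = g d) : rmw f a rel = rmw g a rel := by
  unfold rmw
  cases hd : rel.get? a with
  | none => rfl
  | some d => simp only []; rw [h d hd]

theorem rmw_values_inv (J : List (String × Int) → Prop)
    (f : List (String × Int) → List (String × Int)) (a : String)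
    (rel : PySem.Dict String (List (String × Int)))
    (hf : ∀ d, rel.get? a = some d → J (f d)) (hv : ∀ v ∈ rel.values, J v) :
    ∀ v ∈ (rmw f a rel).values, J v := by
  unfold rmw
  cases hd : rel.get? a with
  | none => exact hv
  | some d =>
    intro v hvmem
    rcases PySem.Dict.mem_values_insert _ _ _ _ hvmem with h | h
    · rw [h]; exact hf d hd
    · exact hv v h

theorem iter_items (h : PySem.Dict String Int → PySem.Dict String Int) :
    ∀ (k : Nat) (d : List (String × Int)),
      (fun d => (h (PySem.Dict.mk d)).items)^[k] d = (h^[k] (PySem.Dict.mk d)).items := by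
  intro k
  induction k with
  | zero => intro d; rfl
  | succ k ih =>
    intro d
    rw [Function.iterate_succ_apply', Function.iterate_succ_apply', ih, mk_items]

theorem filter_beq_swap (n1 : String) (l : List String) :
    l.filter (fun x => !(n1 == x)) = l.filter (fun x => !(x == n1)) := by
  apply List.filter_congr
  intro x _
  by_cases h : x = n1
  · simp [h]
  · have h2 : ¬n1 = x := fun hh => h (Eq.symm hh)
    simp [h, h2]

theorem relInc_eq_rmw (rel : PySem.Dict String (List (String × Int))) (n1 n2 : String) :
    relInc rel n1 n2 = rmw (fun d => (ibump (PySem.Dict.mk d) n2 1).items) n1 rel := by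
  unfold relInc rmw
  cases h : rel.get? n1 with
  | none => rfl
  | some d =>
    cases hb : (PySem.Dict.mk d).get? n2 with
    | none =>
      have : ibump (PySem.Dict.mk d) n2 1 = (PySem.Dict.mk d).insert n2 1 := by
        unfold ibump
        rw [PySem.Dict.getD_eq_get?_getD, hb]
        norm_num
      simp [hb, this]
    | some v =>
      have : ibump (PySem.Dict.mk d) n2 1 = (PySem.Dict.mk d).insert n2 (v + 1) := by
        unfold ibump
        rw [PySem.Dict.getD_eq_get?_getD, hb]
        rfl
      simp [hb, this]

theorem rmw_fold_extract (a : String) (g : PySem.Dict String Int → String → PySem.Dict String Int) :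
    ∀ (S : List String) (rel : PySem.Dict String (List (String × Int))),
      rel.keys.Nodup →
      S.foldl (fun r b => rmw (fun d => (g (PySem.Dict.mk d) b).items) a r) rel
        = rmw (fun d => (S.foldl g (PySem.Dict.mk d)).items) a rel := by
  have thread : ∀ (S : List String) (rel : PySem.Dict String (List (String × Int)))
      (e : PySem.Dict String Int), rel.contains a = true →
      S.foldl (fun r b => rmw (fun d => (g (PySem.Dict.mk d) b).items) a r) (rel.insert a e.items)
        = rel.insert a ((S.foldl g e).items) := by
    intro S
    induction S with
    | nil => intro rel e _; rfl
    | cons b R ih =>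
      intro rel e hc
      rw [List.foldl_cons]
      have hstep : rmw (fun d => (g (PySem.Dict.mk d) b).items) a (rel.insert a e.items)
          = rel.insert a ((g e b).items) := by
        unfold rmw
        rw [PySem.Dict.get?_insert_self]
        exact PySem.Dict.insert_insert_self rel a e.items ((g e b).items)
      rw [hstep]
      rw [ih rel (g e b) hc, List.foldl_cons]
  intro S rel hn
  cases hd : rel.get? a with
  | none =>
    have hstay : ∀ (S' : List String),
        S'.foldl (fun r b => rmw (fun d => (g (PySem.Dict.mk d) b).items) a r) rel = rel := by
      intro S'
      induction S' with
      | nil => rfl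
      | cons b R ih =>
        rw [List.foldl_cons]
        have : rmw (fun d => (g (PySem.Dict.mk d) b).items) a rel = rel := by
          unfold rmw; rw [hd]
        rw [this, ih]
    rw [hstay]
    unfold rmw; rw [hd]
  | some d =>
    have hc : rel.contains a = true := by rw [PySem.Dict.contains_eq_isSome_get?, hd]; rfl
    have hself : rel.insert a d = rel := insert_self_of_get? rel hn hd
    have hd' : d = (PySem.Dict.mk d).items := rfl
    calc S.foldl (fun r b => rmw (fun d => (g (PySem.Dict.mk d) b).items) a r) rel
        = S.foldl (fun r b => rmw (fun d => (g (PySem.Dict.mk d) b).items) a r)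
            (rel.insert a (PySem.Dict.mk d).items) := by rw [← hd']; rw [hself]
      _ = rel.insert a ((S.foldl g (PySem.Dict.mk d)).items) := thread S rel _ hc
      _ = rmw (fun d => (S.foldl g (PySem.Dict.mk d)).items) a rel := by
            unfold rmw; rw [hd]

-- ---- per-line canonical form and assembly ----

def FA (line : List String) (a : String) : List (String × Int) → List (String × Int) :=
  fun d => (pass1 (line.filter (fun x => !(x == a))) (PySem.Dict.mk d)).items

def FB (line : List String) (a : String) : List (String × Int) → List (String × Int) :=
  fun d => (wpass ((PySem.Set.ofList line).filter (fun x => !(x == a)))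
    (fun b => ((line.count a : Int)) * ((line.count b : Int))) (PySem.Dict.mk d)).items

def lineCanon (name_list line : List String)
    (rel : PySem.Dict String (List (String × Int))) : PySem.Dict String (List (String × Int)) :=
  (PySem.Set.ofList line).foldl
    (fun r a => gstep (fun x => name_list.contains x) (FB line) a r) rel

def WFrel (rel : PySem.Dict String (List (String × Int))) : Prop :=
  rel.keys.Nodup ∧ ∀ v ∈ rel.values, (PySem.Dict.mk v).keys.Nodup

theorem get?_mem_values (rel : PySem.Dict String (List (String × Int))) {a : String}
    {d : List (String × Int)} (h : rel.get? a = some d) : d ∈ rel.values := by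
  have hmem := PySem.Dict.mem_items_of_get?_eq_some rel h
  exact List.mem_map.mpr ⟨(a, d), hmem, rfl⟩

theorem gstepB_WF (name_list line : List String) (a : String)
    (r : PySem.Dict String (List (String × Int))) (h : WFrel r) :
    WFrel (gstep (fun x => name_list.contains x) (FB line) a r) := by
  constructor
  · rw [gstep_keys]; exact h.1
  · unfold gstep
    simp only []
    by_cases hP : name_list.contains a = true
    case neg => rw [if_neg hP]; exact h.2
    case pos =>
      rw [if_pos hP]
      apply rmw_values_inv _ _ _ _ _ h.2
      intro d hd
      show (PySem.Dict.mk (FB line a d)).keys.Nodup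
      unfold FB
      rw [mk_items]
      exact wpass_nodup _ _ _ (h.2 d (get?_mem_values r hd))

theorem lineCanon_WF (name_list line : List String)
    (r : PySem.Dict String (List (String × Int))) (h : WFrel r) :
    WFrel (lineCanon name_list line r) := by
  unfold lineCanon
  exact foldl_inv WFrel _ _ r (fun b a hb _ => gstepB_WF name_list line a b hb) h

theorem iterA_eq_stepB (name_list line : List String) (a : String)
    (ha : a ∈ PySem.Set.ofList line) (r : PySem.Dict String (List (String × Int)))
    (h : WFrel r) :
    (gstep (fun x => name_list.contains x) (FA line) a)^[line.count a] r
      = gstep (fun x => name_list.contains x) (FB line) a r := by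
  have haline : a ∈ line := (PySem.Set.mem_ofList _ _).mp ha
  have hpos : 0 < line.count a := List.count_pos_iff.mpr haline
  obtain ⟨m, hm⟩ : ∃ m, line.count a = m + 1 := ⟨line.count a - 1, by omega⟩
  rw [hm, gstep_iter]
  unfold gstep
  simp only []
  by_cases hP : name_list.contains a = true
  case neg => rw [if_neg hP, if_neg hP]
  case pos =>
    rw [if_pos hP, if_pos hP]
    apply rmw_congr
    intro d hd
    have hnd : (PySem.Dict.mk d).keys.Nodup := h.2 d (get?_mem_values r hd)
    show (fun d => (pass1 (line.filter (fun x => !(x == a))) (PySem.Dict.mk d)).items)^[m + 1] d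
        = FB line a d
    rw [iter_items (pass1 (line.filter (fun x => !(x == a)))) (m + 1) d,
        pass1_iter _ m _ hnd]
    unfold FB
    rw [ofList_filter_comm]
    congr 1
    simp only [wpass]
    apply PySem.List.foldl_congr_mem
    intro acc x hx
    have hxa : x ≠ a := by
      have hx' : x ∈ line.filter (fun y => !(y == a)) := (PySem.Set.mem_ofList _ _).mp hx
      have := List.of_mem_filter hx'
      simpa using this
    congr 1
    rw [List.count_filter (by simp [hxa]), hm]
    push_cast
    ring

theorem lineA_eq (name_list line : List String)
    (rel : PySem.Dict String (List (String × Int))) (h : WFrel rel) :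
    line.foldl (fun rel n1 =>
        if name_list.contains n1 then
          line.foldl (fun rel n2 => if n1 == n2 then rel else relInc rel n1 n2) rel
        else rel) rel
      = lineCanon name_list line rel := by
  have hstep1 : ∀ (r : PySem.Dict String (List (String × Int))) (n1 : String), r.keys.Nodup →
      (if name_list.contains n1 then
          line.foldl (fun rel n2 => if n1 == n2 then rel else relInc rel n1 n2) r
        else r) = gstep (fun x => name_list.contains x) (FA line) n1 r := by
    intro r n1 hn
    unfold gstep
    simp only []
    by_cases hP : name_list.contains n1 = true
    case neg => rw [if_neg hP, if_neg hP]
    case pos =>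
      rw [if_pos hP, if_pos hP]
      rw [foldl_skip (fun n2 => n1 == n2) (fun r n2 => relInc r n1 n2) line r,
          filter_beq_swap]
      simp only [relInc_eq_rmw]
      rw [rmw_fold_extract n1 (fun D b => ibump D b 1) _ r hn]
      rfl
  have h1 : line.foldl (fun rel n1 =>
        if name_list.contains n1 then
          line.foldl (fun rel n2 => if n1 == n2 then rel else relInc rel n1 n2) rel
        else rel) rel
      = line.foldl (fun r a => gstep (fun x => name_list.contains x) (FA line) a r) rel := by
    apply foldl_congr_inv (fun r => r.keys.Nodup)
    · exact fun b a hb _ => hstep1 b a hb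
    · intro b a hb _
      show (gstep (fun x => name_list.contains x) (FA line) a b).keys.Nodup
      rw [gstep_keys]; exact hb
    · exact h.1
  rw [h1, gfold_group]
  unfold lineCanon
  apply foldl_congr_inv WFrel
  · exact fun b a hb ha => iterA_eq_stepB name_list line a ha b hb
  · exact fun b a hb _ => gstepB_WF name_list line a b hb
  · exact h

-- B's skip of a line with fewer than two distinct names changes nothing
theorem lineCanon_short (name_list line : List String)
    (rel : PySem.Dict String (List (String × Int))) (h : WFrel rel)
    (hs : (PySem.Set.ofList line).length < 2) : lineCanon name_list line rel = rel := by
  unfold lineCanon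
  cases hS : PySem.Set.ofList line with
  | nil => rfl
  | cons a t =>
    cases t with
    | cons b t' => rw [hS] at hs; simp at hs
    | nil =>
      simp only [List.foldl_cons, List.foldl_nil]
      unfold gstep
      by_cases hP : name_list.contains a = true
      case neg => rw [if_neg hP]
      case pos =>
        rw [if_pos hP]
        unfold rmw
        cases hd : rel.get? a with
        | none => rfl
        | some d =>
          simp only []
          have hFB : FB line a d = d := by
            unfold FB
            have hf : (PySem.Set.ofList line).filter (fun x => !(x == a)) = [] := by
              rw [hS]; simp
            rw [hf]
            rfl
          rw [hFB]
          exact insert_self_of_get? rel h.1 hd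

theorem lineB_eq (name_list line : List String)
    (rel : PySem.Dict String (List (String × Int))) (h : WFrel rel) :
    (let counts := line.foldl (fun c n => c.insert n (c.getD n 0 + 1))
        (PySem.Dict.empty : PySem.Dict String Int)
     if counts.items.length < 2 then rel
     else counts.items.foldl (fun rel pa =>
        if name_list.contains pa.1 then
          match rel.get? pa.1 with
          | none => rel
          | some inner =>
            rel.insert pa.1
              ((counts.items.foldl
                  (fun d pb => if pb.1 == pa.1 then d
                    else d.insert pb.1 (d.getD pb.1 0 + pa.2 * pb.2))
                  (PySem.Dict.mk inner)).items)
        else rel) rel)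
      = lineCanon name_list line rel := by
  show (if ((line.foldl (fun c n => c.insert n (c.getD n 0 + 1))
        (PySem.Dict.empty : PySem.Dict String Int)).items).length < 2 then rel else _) = _
  rw [PySem.Dict.foldl_insert_getD_add_one_eq_counter, PySem.Dict.items_counter]
  rw [List.length_map]
  by_cases hs : (PySem.Set.ofList line).length < 2
  · rw [if_pos hs]
    exact (lineCanon_short name_list line rel h hs).symm
  · rw [if_neg hs, List.foldl_map]
    unfold lineCanon
    apply foldl_congr_inv (fun r => r.keys.Nodup)
    · intro r a hr _
      show (if name_list.contains a then _ else r) = _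
      unfold gstep
      simp only []
      by_cases hP : name_list.contains a = true
      case neg => rw [if_neg hP, if_neg hP]
      case pos =>
        rw [if_pos hP, if_pos hP]
        unfold rmw
        cases hd : r.get? a with
        | none => rfl
        | some inner =>
          simp only []
          congr 1
          rw [List.foldl_map]
          rw [foldl_skip (fun b => b == a)
              (fun d b => d.insert b (d.getD b 0 + (line.count a : Int) * (line.count b : Int)))
              (PySem.Set.ofList line) (PySem.Dict.mk inner)]
          rfl
    · intro b a hb _
      show (gstep (fun x => name_list.contains x) (FB line) a b).keys.Nodup
      rw [gstep_keys]; exact hb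
    · exact h.1

-- ===== VERDICT (by name: the statement is the Claim_ definition above) =====
theorem relationships_spec : Claim_equal_relationships := by
  intro linesName relationship name_list _hdom hpre
  obtain ⟨hk, hv, _⟩ := hpre
  unfold Spec_relationships relationships relationships_alt
  have hI0 : WFrel (PySem.Dict.mk relationship) := by
    constructor
    · exact hk
    · intro v hvm
      obtain ⟨p, hp, hpe⟩ := List.mem_map.mp hvm
      show (PySem.Dict.mk v).keys.Nodup
      rw [← hpe]
      exact hv p hp
  have hA := foldl_congr_inv WFrel
      (fun rel line => line.foldl (fun rel n1 =>
          if name_list.contains n1 then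
            line.foldl (fun rel n2 => if n1 == n2 then rel else relInc rel n1 n2) rel
          else rel) rel)
      (fun rel line => lineCanon name_list line rel)
      linesName (PySem.Dict.mk relationship)
      (fun b a hb _ => lineA_eq name_list a b hb)
      (fun b a hb _ => lineCanon_WF name_list a b hb)
      hI0
  have hB := foldl_congr_inv WFrel
      (fun rel line =>
        let counts := line.foldl (fun c n => c.insert n (c.getD n 0 + 1))
          (PySem.Dict.empty : PySem.Dict String Int)
        if counts.items.length < 2 then rel
        else counts.items.foldl (fun rel pa =>
          if name_list.contains pa.1 then
            match rel.get? pa.1 with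
            | none => rel
            | some inner =>
              rel.insert pa.1
                ((counts.items.foldl
                    (fun d pb => if pb.1 == pa.1 then d
                      else d.insert pb.1 (d.getD pb.1 0 + pa.2 * pb.2))
                    (PySem.Dict.mk inner)).items)
          else rel) rel)
      (fun rel line => lineCanon name_list line rel)
      linesName (PySem.Dict.mk relationship)
      (fun b a hb _ => lineB_eq name_list a b hb)
      (fun b a hb _ => lineCanon_WF name_list a b hb)
      hI0
  exact congrArg PySem.Dict.items (hA.trans hB.symm)
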